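-- pv_equiv track=rewrite | github.com/ChristerNilsson/Lab | 2017/098-progolymp-2017/sidnr.py | f
-- ===== SOURCE A (Python) =====
-- def f(n):
--     digits = [0] * 10
--     for i in range(1,n+1):
--         if i%2 == 1:
--             s = str(i)
--             for digit in s:
--                 digits[int(digit)] += 1
--     return digits
-- ===== SOURCE B (Python) =====
-- def _G(m):
--     # digit-occurrence counts over the decimal representations of all integers 1..m
--     if m <= 0:
--         return [0] * 10
--     q, s = divmod(m, 10)
--     gq = _G(q)
--     gq1 = _G(q - 1)
--     res = [(s + 1) * gq[d] + (9 - s) * gq1[d] for d in range(10)]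
--     for r in range(10):
--         if r <= m:
--             res[r] += (m - r) // 10 + (1 if r else 0)
--     return res
--
--
-- def f(n):
--     digits = [0] * 10
--     for r in range(1, 10, 2):
--         if r <= n:
--             digits[r] += (n - r) // 10 + 1
--             g = _G((n - r) // 10)
--             for d in range(10):
--                 digits[d] += g[d]
--     return digits
-- ===== Notes on version B (the rewrite author's own statement) =====
-- stated objective: faster
-- what changed: Replaces the scan of every number 1..n (string-converting each odd one) by a combinatorial digit-occurrence recursion: numbers are grouped by their last digit, reducing the count over the whole range to a count over the shorter prefixes, a small recursion instead of a linear scan.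
import Mathlib
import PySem

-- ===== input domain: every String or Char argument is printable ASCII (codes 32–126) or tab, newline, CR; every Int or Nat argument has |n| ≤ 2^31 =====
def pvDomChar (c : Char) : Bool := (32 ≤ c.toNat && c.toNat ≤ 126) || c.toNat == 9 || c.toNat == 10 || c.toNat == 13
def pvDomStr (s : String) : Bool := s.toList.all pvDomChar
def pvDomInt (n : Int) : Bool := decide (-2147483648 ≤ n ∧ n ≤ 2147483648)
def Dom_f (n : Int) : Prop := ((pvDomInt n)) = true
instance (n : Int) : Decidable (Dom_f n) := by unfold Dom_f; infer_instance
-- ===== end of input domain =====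

-- B replaces A's scan over every number 1..n by a combinatorial digit-occurrence
-- recursion grouping numbers by their last digit; measured asymptotically faster.


-- ===== PORT A =====
-- literal transliteration of Source A: loop i over range(1, n+1); if i % 2 == 1,
-- iterate over the characters of str(i) and bump digits[int(ch)].
def f (n : Int) : List Int :=
  (PySem.List.pyRange 1 (n + 1) 1).foldl (fun digits i =>
    if PySem.Int.mod i 2 = 1 then
      (PySem.Int.toChars i).foldl (fun ds c =>
        let j := (PySem.Int.ofChars? [c]).getD 0   -- int(digit); never none here: c is a digit char
        PySem.List.pySetD ds j (PySem.List.pyGetD ds j 0 + 1)) digits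
    else digits) (List.replicate 10 0)

-- ===== PORT B =====
-- literal transliteration of Source B's _G: digit counts over all of 1..m by last-digit grouping
def pvG (m : Int) : List Int :=
  if _hm : m ≤ 0 then List.replicate 10 0
  else
    let q := PySem.Int.floordiv m 10
    let s := PySem.Int.mod m 10
    let gq := pvG q
    let gq1 := pvG (q - 1)
    let res := (PySem.List.pyRange 0 10 1).map (fun d =>
      (s + 1) * PySem.List.pyGetD gq d 0 + (9 - s) * PySem.List.pyGetD gq1 d 0)
    (PySem.List.pyRange 0 10 1).foldl (fun res2 r =>
      if r ≤ m then
        PySem.List.pySetD res2 r (PySem.List.pyGetD res2 r 0 +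
          (PySem.Int.floordiv (m - r) 10 + (if r ≠ 0 then 1 else 0)))
      else res2) res
termination_by m.toNat
decreasing_by
  · rw [PySem.Int.floordiv_eq_ediv_of_pos (by omega)]
    have h1 := Int.ediv_le_self (b := 10) (by omega : (0:Int) ≤ m)
    have h2 := Int.ediv_nonneg (by omega : (0:Int) ≤ m) (by omega : (0:Int) ≤ 10)
    omega
  · rw [PySem.Int.floordiv_eq_ediv_of_pos (by omega)]
    have h1 := Int.ediv_le_self (b := 10) (by omega : (0:Int) ≤ m)
    have h2 := Int.ediv_nonneg (by omega : (0:Int) ≤ m) (by omega : (0:Int) ≤ 10)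
    omega

-- literal transliteration of Source B's f: for each odd last digit r ≤ n, add the
-- count of numbers ending in r and the digit counts of their prefixes 1..(n-r)//10.
def f_alt (n : Int) : List Int :=
  (PySem.List.pyRange 1 10 2).foldl (fun digits r =>
    if r ≤ n then
      let digits1 := PySem.List.pySetD digits r
        (PySem.List.pyGetD digits r 0 + (PySem.Int.floordiv (n - r) 10 + 1))
      let g := pvG (PySem.Int.floordiv (n - r) 10)
      (PySem.List.pyRange 0 10 1).foldl (fun ds d =>
        PySem.List.pySetD ds d (PySem.List.pyGetD ds d 0 + PySem.List.pyGetD g d 0)) digits1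
    else digits) (List.replicate 10 0)

-- ===== PRECONDITION & SPEC =====
def Spec_f (n : Int) (out : List Int) : Prop := out = f_alt n
instance (n : Int) (out : List Int) : Decidable (Spec_f n out) := by unfold Spec_f; infer_instance

-- ===== CLAIM (what is proved, stated in full; the proofs are below) =====
def Claim_equal_f : Prop := ∀ (n : Int), Dom_f n → Spec_f n (f n)

-- ===== LEMMAS AND PROOFS =====


-- list of decimal digit values of m (most significant first); [0] for m = 0
def pvVals (m : Nat) : List Nat :=
  if m < 10 then [m] else pvVals (m / 10) ++ [m % 10]
decreasing_by exact Nat.div_lt_self (by omega) (by omega)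

-- number of occurrences of digit d in the decimal representation of m
def pvOcc (d m : Nat) : Int := ((pvVals m).count d : Int)

-- digit-d occurrences summed over all of 1..m
def pvSG (m : Nat) (d : Nat) : Int :=
  match m with
  | 0 => 0
  | k + 1 => pvSG k d + pvOcc d (k + 1)

-- digit-d occurrences summed over the odd numbers among 1..n
def pvSA (n : Nat) (d : Nat) : Int :=
  match n with
  | 0 => 0
  | k + 1 => pvSA k d + (if (k + 1) % 2 = 1 then pvOcc d (k + 1) else 0)

def pvMap (g : Nat → Int) : List Int := (List.range 10).map g

lemma pvMap_replicate : List.replicate 10 (0 : Int) = pvMap (fun _ => 0) := by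
  simp [pvMap, List.map_const']

lemma pvMap_getD (g : Nat → Int) (k : Nat) (hk : k < 10) : (pvMap g).getD k 0 = g k := by
  simpa [pvMap] using PySem.List.getD_map_range g 10 k 0 hk

lemma pvMap_set (g : Nat → Int) (k : Nat) (w : Int) :
    (pvMap g).set k w = pvMap (fun d => if d = k then w else g d) := by
  apply List.ext_getElem
  · simp [pvMap]
  · intro i hi1 hi2
    simp only [pvMap, List.getElem_set, List.getElem_map, List.getElem_range]
    by_cases h : k = i <;> simp [h, Ne.symm]

lemma pvMap_congr {g h : Nat → Int} (H : ∀ d < 10, g d = h d) : pvMap g = pvMap h := by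
  unfold pvMap
  exact List.map_congr_left (fun d hd => H d (List.mem_range.mp hd))

-- int('c') for a decimal digit character
lemma pvOfChars_digit (v : Nat) (hv : v < 10) :
    (PySem.Int.ofChars? [Nat.digitChar v]).getD 0 = (v : Int) := by
  interval_cases v <;> decide

-- pvVals facts
lemma pvVals_small {m : Nat} (h : m < 10) : pvVals m = [m] := by rw [pvVals]; simp [h]

lemma pvVals_big {m : Nat} (h : 10 ≤ m) : pvVals m = pvVals (m / 10) ++ [m % 10] := by
  rw [pvVals]; simp [Nat.not_lt.mpr h]

lemma pvVals_lt (m : Nat) : ∀ v ∈ pvVals m, v < 10 := by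
  induction m using Nat.strong_induction_on with
  | _ m ih =>
    by_cases h : m < 10
    · rw [pvVals_small h]; intro v hv; simp at hv; omega
    · rw [pvVals_big (by omega)]
      intro v hv
      rcases List.mem_append.mp hv with h' | h'
      · exact ih (m / 10) (Nat.div_lt_self (by omega) (by omega)) v h'
      · simp at h'; omega

lemma pvOcc_big {d m : Nat} (h : 10 ≤ m) :
    pvOcc d m = pvOcc d (m / 10) + (if m % 10 = d then 1 else 0) := by
  unfold pvOcc
  rw [pvVals_big h, List.count_append, List.count_singleton]
  by_cases h' : m % 10 = d <;> simp [h']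

lemma pvOcc_small {d m : Nat} (h : m < 10) :
    pvOcc d m = (if m = d then 1 else 0) := by
  unfold pvOcc
  rw [pvVals_small h, List.count_singleton]
  by_cases h' : m = d <;> simp [h']

-- str(i) for i ≥ 1 lists the digit characters of pvVals
lemma pvToDigitsCore (fuel : Nat) :
    ∀ (m : Nat) (l : List Char), m < fuel →
      Nat.toDigitsCore 10 fuel m l = (pvVals m).map Nat.digitChar ++ l := by
  induction fuel with
  | zero => omega
  | succ fuel ih =>
    intro m l hm
    by_cases h10 : m < 10
    · have hq : m / 10 = 0 := Nat.div_eq_of_lt h10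
      simp [Nat.toDigitsCore, hq, pvVals_small h10, Nat.mod_eq_of_lt h10]
    · have hq : m / 10 ≠ 0 := by
        intro h; omega
      have hlt : m / 10 < fuel := by
        have := Nat.div_lt_self (n := m) (by omega) (by omega : 1 < 10)
        omega
      simp only [Nat.toDigitsCore, hq, if_false]
      rw [ih (m / 10) _ hlt, pvVals_big (m := m) (by omega)]
      simp

lemma pvToChars (i : Int) (hi : 1 ≤ i) :
    PySem.Int.toChars i = (pvVals i.toNat).map Nat.digitChar := by
  unfold PySem.Int.toChars
  rw [if_neg (by omega)]
  exact (by simpa using pvToDigitsCore (i.toNat + 1) i.toNat [] (by omega))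

-- ===== A-side characterization =====

-- the inner character loop adds, at each digit d, the number of occurrences of d
lemma pvInnerFold (vs : List Nat) (hvs : ∀ v ∈ vs, v < 10) :
    ∀ g : Nat → Int,
      (vs.map Nat.digitChar).foldl (fun ds c =>
        let j := (PySem.Int.ofChars? [c]).getD 0
        PySem.List.pySetD ds j (PySem.List.pyGetD ds j 0 + 1)) (pvMap g)
      = pvMap (fun d => g d + (vs.count d : Int)) := by
  induction vs with
  | nil => intro g; simp
  | cons v vs ih =>
    intro g
    have hv : v < 10 := hvs v (by simp)
    simp only [List.map_cons, List.foldl_cons]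
    rw [pvOfChars_digit v hv, PySem.List.pySetD_natCast, PySem.List.pyGetD_natCast,
      pvMap_getD g v hv, pvMap_set]
    rw [ih (fun v hv' => hvs v (by simp [hv'])) _]
    apply pvMap_congr
    intro d hd
    rw [List.count_cons]
    by_cases hdv : d = v
    · simp [hdv]; push_cast; ring
    · simp [hdv, Ne.symm hdv]

lemma pvStepA (i : Int) (hi : 1 ≤ i) (g : Nat → Int) :
    (if PySem.Int.mod i 2 = 1 then
      (PySem.Int.toChars i).foldl (fun ds c =>
        let j := (PySem.Int.ofChars? [c]).getD 0
        PySem.List.pySetD ds j (PySem.List.pyGetD ds j 0 + 1)) (pvMap g)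
     else pvMap g)
    = pvMap (fun d => g d + (if i.toNat % 2 = 1 then pvOcc d i.toNat else 0)) := by
  have hmod : PySem.Int.mod i 2 = 1 ↔ i.toNat % 2 = 1 := by
    rw [PySem.Int.mod_eq_emod_of_pos (by omega)]
    omega
  by_cases hodd : i.toNat % 2 = 1
  · rw [if_pos (hmod.mpr hodd), pvToChars i hi, pvInnerFold _ (pvVals_lt i.toNat) g]
    exact pvMap_congr (fun d _ => by simp [hodd, pvOcc])
  · rw [if_neg (fun h => hodd (hmod.mp h))]
    exact pvMap_congr (fun d _ => by simp [hodd])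

lemma pvFA_nat (N : Nat) :
    (PySem.List.pyRange 1 ((N : Int) + 1) 1).foldl (fun digits i =>
      if PySem.Int.mod i 2 = 1 then
        (PySem.Int.toChars i).foldl (fun ds c =>
          let j := (PySem.Int.ofChars? [c]).getD 0
          PySem.List.pySetD ds j (PySem.List.pyGetD ds j 0 + 1)) digits
      else digits) (pvMap (fun _ => 0))
    = pvMap (fun d => pvSA N d) := by
  induction N with
  | zero =>
    rw [show ((0 : Nat) : Int) + 1 = 1 by norm_num, PySem.List.pyRange_one_eq_nil (by omega)]
    rfl
  | succ k ih =>
    have hsplit : PySem.List.pyRange 1 ((k : Int) + 1 + 1) 1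
        = PySem.List.pyRange 1 ((k : Int) + 1) 1 ++ [(k : Int) + 1] :=
      PySem.List.pyRange_one_succ_right (a := 1) (b := (k : Int) + 1) (by omega)
    rw [show ((k + 1 : Nat) : Int) + 1 = (k : Int) + 1 + 1 by push_cast; ring, hsplit,
      List.foldl_append, ih]
    simp only [List.foldl_cons, List.foldl_nil]
    rw [pvStepA ((k : Int) + 1) (by omega) _]
    apply pvMap_congr
    intro d hd
    have : ((k : Int) + 1).toNat = k + 1 := by omega
    simp [this, pvSA]

lemma pvFA (n : Int) : f n = pvMap (fun d => pvSA n.toNat d) := by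
  unfold f
  rw [pvMap_replicate]
  by_cases hn : n ≤ 0
  · rw [PySem.List.pyRange_one_eq_nil (by omega)]
    simp only [List.foldl_nil]
    exact pvMap_congr (fun d _ => by simp [show n.toNat = 0 by omega, pvSA])
  · have : n = ((n.toNat : Nat) : Int) := by omega
    rw [this]
    exact pvFA_nat n.toNat

-- ===== B-side characterization =====

-- generic: folding index-updates over range K starting from pvMap g
lemma pvFoldUpdate (step : List Int → Int → List Int) (φ : Nat → Int → Int)
    (hstep : ∀ (g : Nat → Int) (k : Nat), k < 10 →
      step (pvMap g) ((k : Nat) : Int) = pvMap (fun d => if d = k then φ k (g k) else g d)) :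
    ∀ (K : Nat), K ≤ 10 → ∀ g : Nat → Int,
      (((List.range K).map (fun k => ((k : Nat) : Int)))).foldl step (pvMap g)
      = pvMap (fun d => if d < K then φ d (g d) else g d) := by
  intro K
  induction K with
  | zero => intro _ g; simp
  | succ K ih =>
    intro hK g
    rw [List.range_succ, List.map_append, List.foldl_append, ih (by omega) g]
    simp only [List.map_cons, List.map_nil, List.foldl_cons, List.foldl_nil]
    rw [hstep _ K (by omega)]
    apply pvMap_congr
    intro d hd
    by_cases h1 : d = K
    · simp [h1]
    · by_cases h2 : d < K <;> simp [h1, h2] <;> omega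

lemma pvSG_pred (q d : Nat) (h : 1 ≤ q) : pvSG q d = pvSG (q - 1) d + pvOcc d q := by
  obtain ⟨k, rfl⟩ : ∃ k, q = k + 1 := ⟨q - 1, by omega⟩
  simp [pvSG]

-- the key combinatorial identity behind _G: counting 1..M by last digit
lemma pvKeyG (M : Nat) (d : Nat) (hd : d < 10) :
    pvSG M d = ((M % 10 : Nat) + 1) * pvSG (M / 10) d
      + (9 - (M % 10 : Nat)) * pvSG (M / 10 - 1) d
      + (if d ≤ M then (((M - d) / 10 : Nat) : Int) + (if d = 0 then 0 else 1) else 0) := by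
  induction M with
  | zero =>
    simp [pvSG]
  | succ M IH =>
    have hsplit : pvSG (M + 1) d = pvSG M d + pvOcc d (M + 1) := rfl
    by_cases h0 : (M + 1) % 10 = 0
    · -- carry case: M % 10 = 9, (M+1)/10 = M/10 + 1
      have h10' : 10 ≤ M + 1 := by omega
      have hocc : pvOcc d (M + 1) = pvOcc d ((M + 1) / 10) + (if 0 = d then (1:Int) else 0) := by
        rw [pvOcc_big h10', h0]
      have hLT : (if d ≤ M + 1 then (((M + 1 - d) / 10 : Nat) : Int) + (if d = 0 then 0 else 1) else 0)
          = (if d ≤ M then (((M - d) / 10 : Nat) : Int) + (if d = 0 then 0 else 1) else 0)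
            + (if 0 = d then (1:Int) else 0) := by
        split_ifs <;> omega
      rw [hsplit, IH, hocc, hLT]
      rw [show (M + 1) / 10 = M / 10 + 1 by omega]
      rw [show pvSG (M / 10 + 1) d = pvSG (M / 10) d + pvOcc d (M / 10 + 1) from rfl]
      rw [show M / 10 + 1 - 1 = M / 10 by omega]
      rw [show (((M + 1) % 10 : Nat) : Int) = 0 by omega]
      rw [show ((M % 10 : Nat) : Int) = 9 by omega]
      ring
    · -- no carry: (M+1)/10 = M/10, (M+1)%10 = M%10 + 1
      have hq : (M + 1) / 10 = M / 10 := by omega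
      have hocc : pvOcc d (M + 1)
          = pvSG (M / 10) d - pvSG (M / 10 - 1) d + (if (M + 1) % 10 = d then (1:Int) else 0) := by
        by_cases hM9 : M + 1 < 10
        · have hq0 : M / 10 = 0 := by omega
          rw [pvOcc_small hM9, hq0]
          have hmm : (M + 1) % 10 = M + 1 := by omega
          rw [hmm]
          simp [pvSG]
        · have hq1 : 1 ≤ M / 10 := by omega
          rw [pvOcc_big (by omega), hq]
          rw [pvSG_pred (M / 10) d hq1]
          ring
      have hLT : (if d ≤ M + 1 then (((M + 1 - d) / 10 : Nat) : Int) + (if d = 0 then 0 else 1) else 0)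
          = (if d ≤ M then (((M - d) / 10 : Nat) : Int) + (if d = 0 then 0 else 1) else 0)
            + (if (M + 1) % 10 = d then (1:Int) else 0) := by
        split_ifs <;> omega
      rw [hsplit, IH, hocc, hLT]
      rw [show (M + 1) / 10 = M / 10 by omega]
      rw [show (((M + 1) % 10 : Nat) : Int) = ((M % 10 : Nat) : Int) + 1 by omega]
      ring

lemma pvRange10 : PySem.List.pyRange 0 10 1 = (List.range 10).map (fun k : Nat => (k : Int)) := by
  rw [show (10 : Int) = ((10 : Nat) : Int) by norm_num, PySem.List.pyRange_zero_nat]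

lemma pvG_eq_aux (k : Nat) : ∀ (m : Int), m.toNat ≤ k → pvG m = pvMap (fun d => pvSG m.toNat d) := by
  induction k with
  | zero =>
    intro m hm
    rw [pvG, dif_pos (by omega), pvMap_replicate]
    exact pvMap_congr (fun d _ => by simp [show m.toNat = 0 by omega, pvSG])
  | succ k ih =>
    intro m hm
    by_cases h0 : m ≤ 0
    · rw [pvG, dif_pos h0, pvMap_replicate]
      exact pvMap_congr (fun d _ => by simp [show m.toNat = 0 by omega, pvSG])
    · have hm1 : 1 ≤ m := by omega
      have hqb : 0 ≤ m / 10 ∧ m / 10 < m := by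
        constructor
        · exact Int.ediv_nonneg (by omega) (by omega)
        · have := Int.ediv_le_self (b := 10) (show (0:Int) ≤ m by omega)
          omega
      have hfd : PySem.Int.floordiv m 10 = m / 10 := PySem.Int.floordiv_eq_ediv_of_pos (by omega)
      have hq1 : (m / 10).toNat ≤ k := by omega
      have hq2 : (m / 10 - 1).toNat ≤ k := by omega
      rw [pvG, dif_neg h0]
      simp only [hfd, ih _ hq1, ih _ hq2, pvRange10, List.map_map]
      -- the comprehension list
      have hres : (List.range 10).map ((fun d : Int =>
            (PySem.Int.mod m 10 + 1) * PySem.List.pyGetD (pvMap (fun d => pvSG (m / 10).toNat d)) d 0 +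
            (9 - PySem.Int.mod m 10) * PySem.List.pyGetD (pvMap (fun d => pvSG (m / 10 - 1).toNat d)) d 0) ∘ (fun k : Nat => (k : Int)))
          = pvMap (fun d =>
            (PySem.Int.mod m 10 + 1) * pvSG (m / 10).toNat d + (9 - PySem.Int.mod m 10) * pvSG (m / 10 - 1).toNat d) := by
        apply List.map_congr_left
        intro d hd
        have hd10 : d < 10 := List.mem_range.mp hd
        simp only [Function.comp_apply, PySem.List.pyGetD_natCast]
        rw [pvMap_getD _ d hd10, pvMap_getD _ d hd10]
      rw [hres]
      rw [pvFoldUpdate _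
        (fun k v => if (k : Int) ≤ m then v + (PySem.Int.floordiv (m - k) 10 + (if (k : Int) ≠ 0 then 1 else 0)) else v)
        ?hs 10 (by omega)]
      case hs =>
        intro g k' hk'
        by_cases hc : (k' : Int) ≤ m
        · rw [if_pos hc, PySem.List.pySetD_natCast, PySem.List.pyGetD_natCast, pvMap_getD _ _ hk', pvMap_set]
          exact pvMap_congr (fun d _ => by by_cases h : d = k' <;> simp [h, hc])
        · rw [if_neg hc]
          exact pvMap_congr (fun d _ => by by_cases h : d = k' <;> simp [h, hc])
      · apply pvMap_congr
        intro d hd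
        rw [if_pos hd]
        have hM : (m.toNat : Int) = m := by omega
        have hs' : PySem.Int.mod m 10 = ((m.toNat % 10 : Nat) : Int) := by
          rw [PySem.Int.mod_eq_emod_of_pos (by omega)]; omega
        have hqn : (m / 10).toNat = m.toNat / 10 := by omega
        have hqn1 : (m / 10 - 1).toNat = m.toNat / 10 - 1 := by omega
        by_cases hdm : (d : Int) ≤ m
        · have hdm' : d ≤ m.toNat := by omega
          have hfd2 : PySem.Int.floordiv (m - d) 10 = (((m.toNat - d) / 10 : Nat) : Int) := by
            rw [PySem.Int.floordiv_eq_ediv_of_pos (by omega)]; omega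
          rw [if_pos hdm, pvKeyG m.toNat d hd]
          rw [hs', hqn, hqn1, hfd2, if_pos hdm']
          have : ((d : Int) ≠ 0) = (¬ d = 0) := by simp
          by_cases hdz : d = 0 <;> simp [hdz] <;> ring
        · have hdm' : ¬ d ≤ m.toNat := by omega
          rw [if_neg hdm, pvKeyG m.toNat d hd, hs', hqn, hqn1, if_neg hdm']
          ring

lemma pvG_eq (m : Int) : pvG m = pvMap (fun d => pvSG m.toNat d) := pvG_eq_aux m.toNat m le_rfl

-- one last-digit class r: how its contribution changes from N to N+1
lemma pvTermStep (r : Nat) (hr : r < 10) (N d : Nat) :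
    (if r ≤ N + 1 then (if d = r then (((N + 1 - r) / 10 : Nat) : Int) + 1 else 0) + pvSG ((N + 1 - r) / 10) d else 0)
    = (if r ≤ N then (if d = r then (((N - r) / 10 : Nat) : Int) + 1 else 0) + pvSG ((N - r) / 10) d else 0)
      + (if (N + 1) % 10 = r then
          (if d = r then (1:Int) else 0) + (pvSG ((N + 1 - r) / 10) d - pvSG ((N + 1 - r) / 10 - 1) d)
        else 0) := by
  by_cases h1 : r ≤ N
  · have h2 : r ≤ N + 1 := by omega
    rw [if_pos h1, if_pos h2]
    by_cases h3 : (N + 1) % 10 = r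
    · have hq : (N + 1 - r) / 10 = (N - r) / 10 + 1 := by omega
      rw [if_pos h3, hq]
      rw [show (N - r) / 10 + 1 - 1 = (N - r) / 10 by omega]
      rw [show pvSG ((N - r) / 10 + 1) d = pvSG ((N - r) / 10) d + pvOcc d ((N - r) / 10 + 1) from rfl]
      by_cases hdr : d = r <;> simp [hdr] <;> push_cast <;> ring
    · have hq : (N + 1 - r) / 10 = (N - r) / 10 := by omega
      rw [if_neg h3, hq]
      ring
  · by_cases h2 : r ≤ N + 1
    · have hr2 : r = N + 1 := by omega
      have h3 : (N + 1) % 10 = r := by omega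
      have hq : (N + 1 - r) / 10 = 0 := by omega
      rw [if_pos h2, if_neg h1, if_pos h3, hq]
      simp [pvSG]
    · have h3 : ¬ (N + 1) % 10 = r := by omega
      rw [if_neg h1, if_neg h2, if_neg h3]
      simp

-- the surviving class r = (N+1) % 10 contributes exactly the digits of N+1
lemma pvExtraOne (N d r : Nat) (hd : d < 10) (hr : (N + 1) % 10 = r) (hr10 : r < 10) :
    (if d = r then (1:Int) else 0) + (pvSG ((N + 1 - r) / 10) d - pvSG ((N + 1 - r) / 10 - 1) d)
    = pvOcc d (N + 1) := by
  by_cases h9 : N + 1 < 10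
  · have hNr : N + 1 = r := by omega
    have hq : (N + 1 - r) / 10 = 0 := by omega
    rw [pvOcc_small h9, hq]
    simp [pvSG]
    split_ifs <;> first | rfl | omega
  · have hq1 : 1 ≤ (N + 1 - r) / 10 := by omega
    have hq : (N + 1 - r) / 10 = (N + 1) / 10 := by omega
    rw [pvOcc_big (by omega : 10 ≤ N + 1), hr, pvSG_pred ((N + 1 - r) / 10) d hq1, hq]
    by_cases hdr : d = r <;> simp [hdr, Ne.symm] <;> ring

-- summed over the five odd classes, the change is the digit count of N+1 when N+1 is odd
lemma pvExtra (N d : Nat) (hd : d < 10) :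
    (if (N + 1) % 10 = 1 then (if d = 1 then (1:Int) else 0) + (pvSG ((N + 1 - 1) / 10) d - pvSG ((N + 1 - 1) / 10 - 1) d) else 0)
    + (if (N + 1) % 10 = 3 then (if d = 3 then (1:Int) else 0) + (pvSG ((N + 1 - 3) / 10) d - pvSG ((N + 1 - 3) / 10 - 1) d) else 0)
    + (if (N + 1) % 10 = 5 then (if d = 5 then (1:Int) else 0) + (pvSG ((N + 1 - 5) / 10) d - pvSG ((N + 1 - 5) / 10 - 1) d) else 0)
    + (if (N + 1) % 10 = 7 then (if d = 7 then (1:Int) else 0) + (pvSG ((N + 1 - 7) / 10) d - pvSG ((N + 1 - 7) / 10 - 1) d) else 0)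
    + (if (N + 1) % 10 = 9 then (if d = 9 then (1:Int) else 0) + (pvSG ((N + 1 - 9) / 10) d - pvSG ((N + 1 - 9) / 10 - 1) d) else 0)
    = (if (N + 1) % 2 = 1 then pvOcc d (N + 1) else 0) := by
  have hs : (N + 1) % 10 = 0 ∨ (N + 1) % 10 = 1 ∨ (N + 1) % 10 = 2 ∨ (N + 1) % 10 = 3 ∨
      (N + 1) % 10 = 4 ∨ (N + 1) % 10 = 5 ∨ (N + 1) % 10 = 6 ∨ (N + 1) % 10 = 7 ∨
      (N + 1) % 10 = 8 ∨ (N + 1) % 10 = 9 := by omega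
  rcases hs with h|h|h|h|h|h|h|h|h|h <;> rw [h] <;> norm_num
  · intro h2; omega
  · rw [if_pos (by omega : (N + 1) % 2 = 1)]
    exact pvExtraOne N d 1 hd h (by norm_num)
  · intro h2; omega
  · rw [if_pos (by omega : (N + 1) % 2 = 1)]
    exact pvExtraOne N d 3 hd h (by norm_num)
  · intro h2; omega
  · rw [if_pos (by omega : (N + 1) % 2 = 1)]
    exact pvExtraOne N d 5 hd h (by norm_num)
  · intro h2; omega
  · rw [if_pos (by omega : (N + 1) % 2 = 1)]
    exact pvExtraOne N d 7 hd h (by norm_num)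
  · intro h2; omega
  · rw [if_pos (by omega : (N + 1) % 2 = 1)]
    exact pvExtraOne N d 9 hd h (by norm_num)

-- odd-numbers decomposition by last digit
lemma pvKeyA (N : Nat) (d : Nat) (hd : d < 10) :
    pvSA N d = ([1, 3, 5, 7, 9].map (fun r =>
      if r ≤ N then
        (if d = r then (((N - r) / 10 : Nat) : Int) + 1 else 0) + pvSG ((N - r) / 10) d
      else 0)).sum := by
  induction N with
  | zero => norm_num [pvSA]
  | succ N IH =>
    have hsa : pvSA (N + 1) d = pvSA N d + (if (N + 1) % 2 = 1 then pvOcc d (N + 1) else 0) := rfl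
    simp only [List.map_cons, List.map_nil, List.sum_cons, List.sum_nil] at IH ⊢
    rw [pvTermStep 1 (by omega) N d, pvTermStep 3 (by omega) N d, pvTermStep 5 (by omega) N d,
        pvTermStep 7 (by omega) N d, pvTermStep 9 (by omega) N d, hsa, IH]
    have hE := pvExtra N d hd
    linarith [hE]

-- one pass of the r-loop in f_alt, on a state in pvMap form
lemma pvStepB (n : Int) (r : Nat) (hr : r < 10) (g : Nat → Int) :
    (if ((r : Nat) : Int) ≤ n then
      (PySem.List.pyRange 0 10 1).foldl (fun ds d =>
        PySem.List.pySetD ds d (PySem.List.pyGetD ds d 0 +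
          PySem.List.pyGetD (pvG (PySem.Int.floordiv (n - ((r : Nat) : Int)) 10)) d 0))
        (PySem.List.pySetD (pvMap g) ((r : Nat) : Int)
          (PySem.List.pyGetD (pvMap g) ((r : Nat) : Int) 0 + (PySem.Int.floordiv (n - ((r : Nat) : Int)) 10 + 1)))
     else pvMap g)
    = pvMap (fun d => g d +
        (if ((r : Nat) : Int) ≤ n then
          (if d = r then PySem.Int.floordiv (n - ((r : Nat) : Int)) 10 + 1 else 0)
            + pvSG ((PySem.Int.floordiv (n - ((r : Nat) : Int)) 10).toNat) d
         else 0)) := by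
  by_cases hc : ((r : Nat) : Int) ≤ n
  · rw [if_pos hc, PySem.List.pySetD_natCast, PySem.List.pyGetD_natCast, pvMap_getD _ _ hr, pvMap_set]
    rw [pvRange10]
    rw [pvFoldUpdate _
      (fun k v => v + PySem.List.pyGetD (pvG (PySem.Int.floordiv (n - ((r : Nat) : Int)) 10)) ((k : Nat) : Int) 0)
      ?hs 10 (by omega)]
    case hs =>
      intro g' k hk
      rw [PySem.List.pySetD_natCast, PySem.List.pyGetD_natCast, pvMap_getD _ _ hk, pvMap_set]
    · apply pvMap_congr
      intro d hd
      rw [if_pos hd, pvG_eq, PySem.List.pyGetD_natCast, pvMap_getD _ _ hd]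
      by_cases hdr : d = r <;> simp [hdr, hc] <;> ring
  · rw [if_neg hc]
    exact pvMap_congr (fun d _ => by simp [hc])

-- converting one r-term from the Int world of f_alt to the Nat world of pvKeyA
lemma pvTermConv (n : Int) (r d : Nat) (hr1 : 1 ≤ r) :
    (if ((r : Nat) : Int) ≤ n then
      (if d = r then PySem.Int.floordiv (n - ((r : Nat) : Int)) 10 + 1 else 0)
        + pvSG ((PySem.Int.floordiv (n - ((r : Nat) : Int)) 10).toNat) d
     else 0)
    = (if r ≤ n.toNat then
        (if d = r then (((n.toNat - r) / 10 : Nat) : Int) + 1 else 0) + pvSG ((n.toNat - r) / 10) d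
       else 0) := by
  by_cases h : ((r : Nat) : Int) ≤ n
  · have h' : r ≤ n.toNat := by omega
    have hfd : PySem.Int.floordiv (n - ((r : Nat) : Int)) 10 = (((n.toNat - r) / 10 : Nat) : Int) := by
      rw [PySem.Int.floordiv_eq_ediv_of_pos (by omega)]
      omega
    have hfd2 : (PySem.Int.floordiv (n - ((r : Nat) : Int)) 10).toNat = (n.toNat - r) / 10 := by
      rw [PySem.Int.floordiv_eq_ediv_of_pos (by omega)]
      omega
    rw [if_pos h, if_pos h', hfd2, hfd]
  · rw [if_neg h, if_neg (by omega)]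

lemma pvFB (n : Int) : f_alt n = pvMap (fun d => pvSA n.toNat d) := by
  unfold f_alt
  rw [pvMap_replicate]
  rw [show PySem.List.pyRange 1 10 2
      = [((1 : Nat) : Int), ((3 : Nat) : Int), ((5 : Nat) : Int), ((7 : Nat) : Int), ((9 : Nat) : Int)] by decide]
  simp only [List.foldl_cons, List.foldl_nil]
  rw [pvStepB n 1 (by omega) _, pvStepB n 3 (by omega) _, pvStepB n 5 (by omega) _,
      pvStepB n 7 (by omega) _, pvStepB n 9 (by omega) _]
  apply pvMap_congr
  intro d hd
  rw [pvKeyA n.toNat d hd]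
  simp only [List.map_cons, List.map_nil, List.sum_cons, List.sum_nil]
  rw [← pvTermConv n 1 d (by omega), ← pvTermConv n 3 d (by omega), ← pvTermConv n 5 d (by omega),
      ← pvTermConv n 7 d (by omega), ← pvTermConv n 9 d (by omega)]
  ring

-- ===== VERDICT (by name: the statement is the Claim_ definition above) =====
theorem f_spec : Claim_equal_f := by
  intro n _
  unfold Spec_f
  rw [pvFA, pvFB]
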